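-- pv_equiv track=rewrite | github.com/KolyanPWNZ/Stepik_algoritmics | chapter_6/task_3.py | left_border_search
-- ===== SOURCE A (Python) =====
-- def left_border_search(segments: list, point: int) -> int:
--     low = 0
--     high = len(segments)
--     while low < high:
--         mid = (low + high) // 2
--         if segments[mid][0] <= point:
--             low = mid + 1
--         else:
--             high = mid
--     return low
-- ===== SOURCE B (Python) =====
-- def left_border_search(segments: list, point: int) -> int:
--     # recursive divide-and-conquer on list slices instead of an index-bounds loop
--     if not segments:
--         return 0
--     mid = len(segments) // 2
--     if segments[mid][0] <= point:
--         return mid + 1 + left_border_search(segments[mid + 1:], point)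
--     return left_border_search(segments[:mid], point)
-- ===== Notes on version B (the rewrite author's own statement) =====
-- stated objective: alternative
-- what changed: Replaces the iterative low/high bounds loop by recursive divide-and-conquer on list slices (recurse on the half-list, add the offset back).
import Mathlib
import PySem

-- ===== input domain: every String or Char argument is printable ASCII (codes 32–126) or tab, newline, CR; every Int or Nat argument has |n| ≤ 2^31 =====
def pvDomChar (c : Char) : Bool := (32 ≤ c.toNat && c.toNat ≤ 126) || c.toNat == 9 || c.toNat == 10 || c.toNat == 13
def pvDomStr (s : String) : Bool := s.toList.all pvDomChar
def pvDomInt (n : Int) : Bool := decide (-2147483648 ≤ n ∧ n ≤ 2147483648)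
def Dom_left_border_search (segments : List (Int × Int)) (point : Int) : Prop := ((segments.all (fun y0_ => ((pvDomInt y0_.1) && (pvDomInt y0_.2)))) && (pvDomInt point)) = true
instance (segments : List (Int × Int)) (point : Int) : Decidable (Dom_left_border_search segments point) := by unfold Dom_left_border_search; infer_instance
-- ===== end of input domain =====

-- B replaces A's iterative low/high bounds loop by recursive divide-and-conquer on list slices (alternative decomposition, same comparisons).


-- ===== PORT A =====
-- the 'while low < high' loop, as recursion on the Int state (low, high); the index mid is always
-- in range when 0 ≤ low < high ≤ len, so pyGetD's default is unreachable
def lbsLoop (segments : List (Int × Int)) (point : Int) (low high : Int) : Int :=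
  if _h : low < high then
    let mid := PySem.Int.floordiv (low + high) 2
    if (PySem.List.pyGetD segments mid (0, 0)).1 ≤ point then
      lbsLoop segments point (mid + 1) high
    else
      lbsLoop segments point low mid
  else
    low
termination_by (high - low).toNat
decreasing_by
  · have := PySem.Int.floordiv_two_mid_bounds (lo := low) (hi := high) (le_of_lt _h)
    omega
  · have h1 : PySem.Int.floordiv (low + high) 2 < high := by
      rw [PySem.Int.floordiv_lt_iff_lt_mul (by omega)]; omega
    have := PySem.Int.floordiv_two_mid_bounds (lo := low) (hi := high) (le_of_lt _h)
    omega

def left_border_search (segments : List (Int × Int)) (point : Int) : Int :=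
  lbsLoop segments point 0 (PySem.List.len segments)

-- ===== PORT B =====
-- len(xs) // 2 as a Nat cast (used by the termination argument of the port of B)
theorem lbs_half_len {α : Type} (xs : List α) :
    PySem.Int.floordiv (PySem.List.len xs) 2 = ((xs.length / 2 : Nat) : Int) := by
  rw [PySem.List.len_eq]; exact_mod_cast PySem.Int.floordiv_natCast xs.length 2

def left_border_search_alt (segments : List (Int × Int)) (point : Int) : Int :=
  if segments.isEmpty then 0
  else
    let mid := PySem.Int.floordiv (PySem.List.len segments) 2
    if (PySem.List.pyGetD segments mid (0, 0)).1 ≤ point then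
      mid + 1 + left_border_search_alt (PySem.List.slice segments (some (mid + 1)) none) point
    else
      left_border_search_alt (PySem.List.slice segments none (some mid)) point
termination_by segments.length
decreasing_by
  · have hne : segments ≠ [] := by simpa [List.isEmpty_iff] using ‹¬ segments.isEmpty = true›
    have hlen : 0 < segments.length := List.length_pos_iff.mpr hne
    rw [lbs_half_len,
      show ((segments.length / 2 : Nat) : Int) + 1 = ((segments.length / 2 + 1 : Nat) : Int) by
        push_cast; ring,
      PySem.List.slice_from_natCast, List.length_drop]
    omega
  · have hne : segments ≠ [] := by simpa [List.isEmpty_iff] using ‹¬ segments.isEmpty = true›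
    have hlen : 0 < segments.length := List.length_pos_iff.mpr hne
    rw [lbs_half_len, PySem.List.slice_to_natCast, List.length_take]
    omega

-- ===== PRECONDITION & SPEC =====
def Spec_left_border_search (segments : List (Int × Int)) (point : Int) (out : Int) : Prop := out = left_border_search_alt segments point
instance (segments : List (Int × Int)) (point : Int) (out : Int) : Decidable (Spec_left_border_search segments point out) := by unfold Spec_left_border_search; infer_instance

-- ===== CLAIM (what is proved, stated in full; the proofs are below) =====
def Claim_equal_left_border_search : Prop := ∀ (segments : List (Int × Int)) (point : Int), Dom_left_border_search segments point → Spec_left_border_search segments point (left_border_search segments point)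

-- ===== LEMMAS AND PROOFS =====

-- one-step unfolding of A's loop when it runs
theorem lbsLoop_step (segments : List (Int × Int)) (point low high : Int) (h : low < high) :
    lbsLoop segments point low high =
      if (PySem.List.pyGetD segments (PySem.Int.floordiv (low + high) 2) (0, 0)).1 ≤ point then
        lbsLoop segments point (PySem.Int.floordiv (low + high) 2 + 1) high
      else
        lbsLoop segments point low (PySem.Int.floordiv (low + high) 2) := by
  rw [lbsLoop, dif_pos h]

-- one-step unfolding of B on a nonempty list
theorem alt_step (segments : List (Int × Int)) (point : Int) (h : ¬ segments.isEmpty) :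
    left_border_search_alt segments point =
      if (PySem.List.pyGetD segments (PySem.Int.floordiv (PySem.List.len segments) 2) (0, 0)).1 ≤ point then
        PySem.Int.floordiv (PySem.List.len segments) 2 + 1 +
          left_border_search_alt
            (PySem.List.slice segments (some (PySem.Int.floordiv (PySem.List.len segments) 2 + 1)) none) point
      else
        left_border_search_alt
          (PySem.List.slice segments none (some (PySem.Int.floordiv (PySem.List.len segments) 2))) point := by
  rw [left_border_search_alt, if_neg h]

-- A's loop on the window [l, h) equals l plus B applied to the sublist segments[l:h]
theorem lbsLoop_eq_alt (segments : List (Int × Int)) (point : Int) :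
    ∀ (d l h : Nat), h - l = d → h ≤ segments.length →
      lbsLoop segments point (l : Int) (h : Int) =
        (l : Int) + left_border_search_alt ((segments.drop l).take (h - l)) point := by
  intro d
  induction d using Nat.strong_induction_on with
  | _ d IH =>
    intro l h hd hle
    by_cases hlh : l < h
    · -- loop body runs
      have hlh' : (l : Int) < (h : Int) := by exact_mod_cast hlh
      rw [lbsLoop_step segments point _ _ hlh']
      have hmid : PySem.Int.floordiv ((l : Int) + (h : Int)) 2 = (((l + h) / 2 : Nat) : Int) := by
        rw [show (l : Int) + (h : Int) = (((l + h : Nat)) : Int) by push_cast; ring]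
        exact_mod_cast PySem.Int.floordiv_natCast (l + h) 2
      set m : Nat := (l + h) / 2 with hm
      have hlm : l ≤ m := by omega
      have hmh : m < h := by omega
      set sub : List (Int × Int) := (segments.drop l).take (h - l) with hsub
      have hsublen : sub.length = h - l := by
        simp [hsub, List.length_take, List.length_drop]; omega
      have hsubne : ¬ sub.isEmpty := by
        rw [List.isEmpty_iff]; intro hnil
        rw [hnil] at hsublen; simp at hsublen; omega
      rw [alt_step sub point hsubne]
      have hmid' : PySem.Int.floordiv (PySem.List.len sub) 2 = (((h - l) / 2 : Nat) : Int) := by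
        rw [lbs_half_len, hsublen]
      set m' : Nat := (h - l) / 2 with hm'
      have hmm' : m = l + m' := by omega
      have hm'lt : m' < sub.length := by omega
      have hmlt : m < segments.length := by omega
      have hidx : (PySem.List.pyGetD sub ((m' : Nat) : Int) (0, 0)) = segments[m] := by
        rw [PySem.List.pyGetD_natCast, List.getD_eq_getElem _ _ hm'lt]
        simp [hsub, List.getElem_take, List.getElem_drop, hmm']
      have hidxA : (PySem.List.pyGetD segments ((m : Nat) : Int) (0, 0)) = segments[m] := by
        rw [PySem.List.pyGetD_natCast, List.getD_eq_getElem _ _ hmlt]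
      rw [hmid, hmid', hidx, hidxA]
      by_cases hc : segments[m].1 ≤ point
      · rw [if_pos hc, if_pos hc]
        -- A recurses on [m+1, h); B on sub[m'+1:]
        rw [show ((m : Nat) : Int) + 1 = ((m + 1 : Nat) : Int) by push_cast; ring,
          IH (h - (m + 1)) (by omega) (m + 1) h (by omega) hle,
          show ((m' : Nat) : Int) + 1 = ((m' + 1 : Nat) : Int) by push_cast; ring,
          PySem.List.slice_from_natCast]
        have hdrop : sub.drop (m' + 1) = (segments.drop (m + 1)).take (h - (m + 1)) := by
          rw [hsub, List.drop_take, List.drop_drop]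
          congr 1
          · omega
          · congr 1; omega
        rw [hdrop, hmm']; push_cast; ring
      · rw [if_neg hc, if_neg hc]
        -- A recurses on [l, m); B on sub[:m']
        rw [IH (m - l) (by omega) l m (by omega) (by omega), PySem.List.slice_to_natCast]
        have htake : sub.take m' = (segments.drop l).take (m - l) := by
          rw [hsub, List.take_take]; congr 1; omega
        rw [htake]
    · -- loop exits immediately
      have hlh' : ¬ (l : Int) < (h : Int) := by exact_mod_cast hlh
      rw [lbsLoop, dif_neg hlh']
      have : h - l = 0 := by omega
      rw [this]
      simp [left_border_search_alt]

-- ===== VERDICT (by name: the statement is the Claim_ definition above) =====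
theorem left_border_search_spec : Claim_equal_left_border_search := by
  intro segments point _
  unfold Spec_left_border_search left_border_search
  have h := lbsLoop_eq_alt segments point segments.length 0 segments.length rfl le_rfl
  simp only [Nat.cast_zero, Nat.sub_zero, List.drop_zero, List.take_length] at h
  rw [PySem.List.len_eq, h, zero_add]
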